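-- pv_equiv track=rewrite | github.com/LeWaldm/covarianceEquivalence | covEqComb.py | interesting_ptts
-- ===== SOURCE A (Python) =====
-- def partitions(n, I=1):
--     yield (n,)
--     for i in range(I, n//2 + 1):
--         for p in partitions(n-i, i):
--             yield (i,) + p
--
-- def interesting_ptts(n):
--     ptts = list(partitions(n))
--     out = list()
--     for p in ptts:
--         if p.count(1) > 1:
--             l = list(p)
--             l.sort(reverse=True)
--             i = 1
--             tmp = list()
--             for j in range(len(l)):
--                 tmp.append(list(range(i,i+l[j])))
--                 i = i+l[j]
--             out.append(tmp)
--     return out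
-- ===== SOURCE B (Python) =====
-- def interesting_ptts(n):
--     # iterative DFS with an explicit stack of (prefix, remaining, min_part) frames;
--     # filters and builds blocks on the fly instead of materialising all partitions first
--     out = []
--     stack = [((), n, 1)]
--     while stack:
--         prefix, m, lo = stack.pop()
--         p = prefix + (m,)
--         if p.count(1) > 1:
--             l = sorted(p, reverse=True)
--             offs = [1]
--             for v in l:
--                 offs.append(offs[-1] + v)
--             out.append([list(range(a, a + v)) for a, v in zip(offs, l)])
--         for i in range(m // 2, lo - 1, -1):
--             stack.append((prefix + (i,), m - i, i))
--     return out
-- ===== Notes on version B (the rewrite author's own statement) =====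
-- stated objective: alternative
-- what changed: Replaces the recursive generator plus collect-all-then-filter pipeline with an explicit stack-driven iterative DFS that filters each partition and builds its consecutive blocks on the fly (blocks computed from a cumulative-offsets list zipped with the sorted parts instead of a running index over positions).
import Mathlib
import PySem

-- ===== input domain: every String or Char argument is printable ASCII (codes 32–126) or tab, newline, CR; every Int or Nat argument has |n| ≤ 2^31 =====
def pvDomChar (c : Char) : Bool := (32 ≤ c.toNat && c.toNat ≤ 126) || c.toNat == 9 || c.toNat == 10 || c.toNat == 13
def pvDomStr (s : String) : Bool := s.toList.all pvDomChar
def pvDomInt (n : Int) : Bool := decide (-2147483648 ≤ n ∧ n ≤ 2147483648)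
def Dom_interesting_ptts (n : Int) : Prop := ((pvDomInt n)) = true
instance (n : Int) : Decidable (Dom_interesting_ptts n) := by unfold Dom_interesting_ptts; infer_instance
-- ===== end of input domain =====

-- B replaces the recursive generator + collect-then-filter pipeline by an explicit stack-driven
-- iterative DFS that filters and builds the blocks (via cumulative offsets zipped with the parts)
-- on the fly; same output, alternative structure (no speed claim).

-- ===== PORT A =====
-- A's recursive generator `partitions`; the Nat fuel is only a totality guard
-- (n.toNat + 1 always suffices, proved below in pyPartitions_fuel/loop lemmas)
def pyPartitions : Nat → Int → Int → List (List Int)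
  | 0, _, _ => []
  | g+1, n, I =>
      [n] :: (PySem.List.pyRange I (PySem.Int.floordiv n 2 + 1) 1).flatMap
        (fun i => (pyPartitions g (n - i) i).map (fun p => i :: p))

-- the inner block-building loop of A: for j in range(len(l)): tmp.append(range(i,i+l[j])); i += l[j]
def buildA (l : List Int) : List (List Int) :=
  ((PySem.List.pyRange 0 (l.length : Int) 1).foldl
    (fun (st : Int × List (List Int)) j =>
      (st.1 + PySem.List.pyGetD l j 0,
       st.2 ++ [PySem.List.pyRange st.1 (st.1 + PySem.List.pyGetD l j 0) 1]))
    (1, ([] : List (List Int)))).2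

def interesting_ptts (n : Int) : List (List (List Int)) :=
  let ptts := pyPartitions (n.toNat + 1) n 1
  ptts.foldl
    (fun out p =>
      if 1 < PySem.List.count p 1 then
        out ++ [buildA (PySem.List.sorted p (fun x => x) true)]
      else out)
    []

-- ===== PORT B =====
-- cumulative offsets, zipped with the sorted parts (zip truncates the extra last offset)
def buildB (p : List Int) : List (List Int) :=
  let l := PySem.List.sorted p (fun x => x) true
  let offs := l.foldl (fun (o : List Int) v => o ++ [o.getLast?.getD 0 + v]) [1]
  (offs.zip l).map (fun av => PySem.List.pyRange av.1 (av.1 + av.2) 1)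

-- the while-stack loop of Source B; the Nat fuel is only a totality guard (it bounds the number
-- of pops; (n.toNat+1)! always suffices, proved below)
def loopB : Nat → List (List Int × Int × Int) → List (List (List Int)) → List (List (List Int))
  | _, [], out => out
  | 0, _ :: _, out => out
  | g+1, (pre, m, lo) :: rest, out =>
      let p := pre ++ [m]
      let out' := if 1 < PySem.List.count p 1 then out ++ [buildB p] else out
      loopB g
        ((PySem.List.pyRange (PySem.Int.floordiv m 2) (lo - 1) (-1)).foldl
          (fun st i => (pre ++ [i], m - i, i) :: st) rest)
        out'

def interesting_ptts_alt (n : Int) : List (List (List Int)) :=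
  loopB (Nat.factorial (n.toNat + 1)) [(([] : List Int), n, 1)] []

-- ===== PRECONDITION & SPEC =====
def Spec_interesting_ptts (n : Int) (out : List (List (List Int))) : Prop := out = interesting_ptts_alt n
instance (n : Int) (out : List (List (List Int))) : Decidable (Spec_interesting_ptts n out) := by unfold Spec_interesting_ptts; infer_instance

-- ===== CLAIM (what is proved, stated in full; the proofs are below) =====
def Claim_equal_interesting_ptts : Prop := ∀ (n : Int), Dom_interesting_ptts n → Spec_interesting_ptts n (interesting_ptts n)

-- ===== LEMMAS AND PROOFS =====

-- the filtering/accumulating step both programs perform per partition (phrased with B's builder)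
def pvStep (out : List (List (List Int))) (p : List Int) : List (List (List Int)) :=
  if 1 < PySem.List.count p 1 then out ++ [buildB p] else out

-- what a stack frame will eventually emit: its subtree's partitions, prefixed
def pvEmit (fr : List Int × Int × Int) : List (List Int) :=
  (pyPartitions (fr.2.1.toNat + 1) fr.2.1 fr.2.2).map (fun q => fr.1 ++ q)

def pvFlat (stack : List (List Int × Int × Int)) : List (List Int) := stack.flatMap pvEmit

-- running offsets: scanTail c [v1,v2,…] = [c+v1, c+v1+v2, …]
def pvScan (c : Int) : List Int → List Int
  | [] => []
  | v :: t => (c + v) :: pvScan (c + v) t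

theorem pvOffs_foldl (l : List Int) : ∀ (o : List Int) (c : Int), o.getLast? = some c →
    l.foldl (fun (o : List Int) v => o ++ [o.getLast?.getD 0 + v]) o = o ++ pvScan c l := by
  induction l with
  | nil => intro o c _; simp [pvScan]
  | cons v t ih =>
      intro o c h
      simp only [List.foldl_cons, h, Option.getD_some]
      rw [ih (o ++ [c + v]) (c + v) (by simp), pvScan, List.append_assoc]
      rfl

theorem pvBuild_core (l : List Int) : ∀ (c : Int) (acc : List (List Int)),
    (l.foldl (fun (st : Int × List (List Int)) v =>
        (st.1 + v, st.2 ++ [PySem.List.pyRange st.1 (st.1 + v) 1])) (c, acc)).2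
      = acc ++ ((c :: pvScan c l).zip l).map (fun av => PySem.List.pyRange av.1 (av.1 + av.2) 1) := by
  induction l with
  | nil => intro c acc; simp [pvScan]
  | cons v t ih =>
      intro c acc
      simp only [List.foldl_cons, pvScan, List.zip_cons_cons, List.map_cons]
      rw [ih (c + v) (acc ++ [PySem.List.pyRange c (c + v) 1]), List.append_assoc]
      rfl

theorem pvBuild_eq (p : List Int) : buildB p = buildA (PySem.List.sorted p (fun x => x) true) := by
  show (((PySem.List.sorted p (fun x => x) true).foldl
          (fun (o : List Int) v => o ++ [o.getLast?.getD 0 + v]) [1]).zip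
          (PySem.List.sorted p (fun x => x) true)).map
        (fun av => PySem.List.pyRange av.1 (av.1 + av.2) 1) = _
  unfold buildA
  rw [PySem.List.foldl_pyRange_zero_pyGetD' (PySem.List.sorted p (fun x => x) true) 0
    (fun (st : Int × List (List Int)) v =>
      (st.1 + v, st.2 ++ [PySem.List.pyRange st.1 (st.1 + v) 1])) (1, [])]
  rw [pvOffs_foldl _ [1] 1 rfl, pvBuild_core]
  rfl

-- congruence for flatMap over members
theorem pvFlatMap_congr {α β : Type} (l : List α) (f g : α → List β)
    (h : ∀ a ∈ l, f a = g a) : l.flatMap f = l.flatMap g := by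
  induction l with
  | nil => rfl
  | cons x t ih =>
      simp only [List.flatMap_cons, h x (List.mem_cons_self), ih (fun a ha => h a (List.mem_cons_of_mem _ ha))]

-- a member i of range(lo, m//2 + 1) satisfies lo ≤ i and 2*i ≤ m
theorem pvMemRange {m lo i : Int} (h : i ∈ PySem.List.pyRange lo (PySem.Int.floordiv m 2 + 1) 1) :
    lo ≤ i ∧ 2 * i ≤ m := by
  rw [PySem.List.mem_pyRange_one] at h
  have h2 : PySem.Int.floordiv m 2 = m / 2 := PySem.Int.floordiv_eq_ediv_of_pos (by norm_num)
  omega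

-- fuel-irrelevance of the A-side generator (canonical fuel m.toNat+1)
theorem pyPartitions_fuel : ∀ (g : Nat) (m lo : Int), 1 ≤ lo → m.toNat < g →
    pyPartitions g m lo = pyPartitions (m.toNat + 1) m lo := by
  intro g
  induction g using Nat.strong_induction_on with
  | _ g ih =>
    intro m lo hlo hg
    match g, hg with
    | g+1, hg =>
      simp only [pyPartitions]
      congr 1
      apply pvFlatMap_congr
      intro i hi
      obtain ⟨h1, h2⟩ := pvMemRange hi
      rw [ih g (by omega) (m - i) i (by omega) (by omega)]
      rw [ih m.toNat (by omega) (m - i) i (by omega) (by omega)]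

-- size bound: the number of partitions emitted from (m, lo) is at most (m.toNat+1)!
theorem pyPartitions_len : ∀ (g : Nat) (m lo : Int), 1 ≤ lo →
    (pyPartitions g m lo).length ≤ Nat.factorial (m.toNat + 1) := by
  intro g
  induction g with
  | zero => intro m lo _; simp [pyPartitions]
  | succ g ih =>
      intro m lo hlo
      simp only [pyPartitions, List.length_cons]
      rw [List.length_flatMap]
      have hsum : ((PySem.List.pyRange lo (PySem.Int.floordiv m 2 + 1) 1).map
          (fun i => ((pyPartitions g (m - i) i).map (fun p => i :: p)).length)).sum
          ≤ (PySem.List.pyRange lo (PySem.Int.floordiv m 2 + 1) 1).length * Nat.factorial m.toNat := by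
        have := List.sum_le_card_nsmul
          ((PySem.List.pyRange lo (PySem.Int.floordiv m 2 + 1) 1).map
            (fun i => ((pyPartitions g (m - i) i).map (fun p => i :: p)).length))
          (Nat.factorial m.toNat) ?_
        · simpa using this
        · intro x hx
          rw [List.mem_map] at hx
          obtain ⟨i, hi, rfl⟩ := hx
          obtain ⟨h1, h2⟩ := pvMemRange hi
          rw [List.length_map]
          calc (pyPartitions g (m - i) i).length
              ≤ Nat.factorial ((m - i).toNat + 1) := ih (m - i) i (by omega)
            _ ≤ Nat.factorial m.toNat := Nat.factorial_le (by omega)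
      have hlen : (PySem.List.pyRange lo (PySem.Int.floordiv m 2 + 1) 1).length ≤ m.toNat := by
        rw [PySem.List.length_pyRange_one]
        have h2 : PySem.Int.floordiv m 2 = m / 2 := PySem.Int.floordiv_eq_ediv_of_pos (by norm_num)
        omega
      have hf : 0 < Nat.factorial m.toNat := Nat.factorial_pos _
      have : (PySem.List.pyRange lo (PySem.Int.floordiv m 2 + 1) 1).length * Nat.factorial m.toNat
          ≤ m.toNat * Nat.factorial m.toNat := Nat.mul_le_mul_right _ hlen
      rw [Nat.factorial_succ]
      have hx : (m.toNat + 1) * Nat.factorial m.toNat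
          = m.toNat * Nat.factorial m.toNat + Nat.factorial m.toNat := by ring
      omega

-- pushing a reversed range onto the stack front = the forward range, mapped, prepended
theorem pvPush {α β : Type} (L : List α) (f : α → β) : ∀ (st : List β),
    L.reverse.foldl (fun st i => f i :: st) st = L.map f ++ st := by
  induction L with
  | nil => intro st; rfl
  | cons x t ih =>
      intro st
      rw [List.reverse_cons, List.foldl_append, ih st]
      rfl

-- a frame's pending emission: its own partition first, then its children's, in DFS order
theorem pvEmit_expand (pre : List Int) (m lo : Int) (hlo : 1 ≤ lo) :
    pvEmit (pre, m, lo) = (pre ++ [m]) ::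
      ((PySem.List.pyRange lo (PySem.Int.floordiv m 2 + 1) 1).map
        (fun i => (pre ++ [i], m - i, i))).flatMap pvEmit := by
  show (pyPartitions (m.toNat + 1) m lo).map (fun q => pre ++ q) = _
  simp only [pyPartitions, List.map_cons]
  congr 1
  rw [List.map_flatMap, List.flatMap_map]
  apply pvFlatMap_congr
  intro i hi
  obtain ⟨h1, h2⟩ := pvMemRange hi
  show ((pyPartitions m.toNat (m - i) i).map (fun p => i :: p)).map (fun q => pre ++ q)
      = pvEmit (pre ++ [i], m - i, i)
  show _ = (pyPartitions ((m - i).toNat + 1) (m - i) i).map (fun q => (pre ++ [i]) ++ q)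
  rw [← pyPartitions_fuel m.toNat (m - i) i (by omega) (by omega), List.map_map]
  apply List.map_congr_left
  intro q _
  simp [List.append_assoc]

theorem pvFlat_cons (pre : List Int) (m lo : Int) (rest : List (List Int × Int × Int)) (hlo : 1 ≤ lo) :
    pvFlat ((pre, m, lo) :: rest)
      = (pre ++ [m]) :: pvFlat (((PySem.List.pyRange lo (PySem.Int.floordiv m 2 + 1) 1).map
          (fun i => (pre ++ [i], m - i, i))) ++ rest) := by
  simp only [pvFlat, List.flatMap_cons, List.flatMap_append, pvEmit_expand pre m lo hlo,
    List.cons_append]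

-- the stack loop realises a left fold of pvStep over the frames' pending emissions
theorem loopB_sim : ∀ (fuel : Nat) (stack : List (List Int × Int × Int)) (out : List (List (List Int))),
    (∀ fr ∈ stack, 1 ≤ fr.2.2) → (pvFlat stack).length ≤ fuel →
    loopB fuel stack out = (pvFlat stack).foldl pvStep out := by
  intro fuel
  induction fuel with
  | zero =>
      intro stack out hlo hlen
      match stack with
      | [] => rfl
      | (pre, m, lo) :: rest =>
          exfalso
          rw [pvFlat_cons pre m lo rest (hlo _ List.mem_cons_self)] at hlen
          simp at hlen
  | succ g ih =>
      intro stack out hlo hlen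
      match stack with
      | [] => rfl
      | (pre, m, lo) :: rest =>
          have hl1 : 1 ≤ lo := hlo _ List.mem_cons_self
          have hrw : PySem.List.pyRange (PySem.Int.floordiv m 2) (lo - 1) (-1)
              = (PySem.List.pyRange lo (PySem.Int.floordiv m 2 + 1) 1).reverse := by
            rw [PySem.List.pyRange_neg_one_eq_reverse]
            norm_num
          rw [pvFlat_cons pre m lo rest hl1, List.foldl_cons]
          show loopB g ((PySem.List.pyRange (PySem.Int.floordiv m 2) (lo - 1) (-1)).foldl
              (fun st i => (pre ++ [i], m - i, i) :: st) rest)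
              (if 1 < PySem.List.count (pre ++ [m]) 1 then out ++ [buildB (pre ++ [m])] else out) = _
          rw [hrw, pvPush]
          have hstep : (if 1 < PySem.List.count (pre ++ [m]) 1 then out ++ [buildB (pre ++ [m])] else out)
              = pvStep out (pre ++ [m]) := rfl
          rw [hstep, ih _ (pvStep out (pre ++ [m])) ?h1 ?h2]
          case h1 =>
            intro fr hfr
            rcases List.mem_append.mp hfr with hfr | hfr
            · obtain ⟨i, hi, rfl⟩ := List.mem_map.mp hfr
              obtain ⟨hia, _⟩ := pvMemRange hi
              show 1 ≤ i
              omega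
            · exact hlo _ (List.mem_cons_of_mem _ hfr)
          case h2 =>
            rw [pvFlat_cons pre m lo rest hl1] at hlen
            simp only [List.length_cons] at hlen
            omega

-- ===== VERDICT (by name: the statement is the Claim_ definition above) =====
theorem interesting_ptts_spec : Claim_equal_interesting_ptts := by
  intro n _
  show (pyPartitions (n.toNat + 1) n 1).foldl
      (fun out p => if 1 < PySem.List.count p 1 then
        out ++ [buildA (PySem.List.sorted p (fun x => x) true)] else out) []
    = loopB (Nat.factorial (n.toNat + 1)) [([], n, 1)] []
  have hflat : pvFlat [(([] : List Int), n, 1)] = pyPartitions (n.toNat + 1) n 1 := by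
    simp [pvFlat, pvEmit]
  rw [loopB_sim _ _ _ ?h1 ?h2, hflat]
  case h1 =>
    intro fr hfr
    simp only [List.mem_singleton] at hfr
    subst hfr
    norm_num
  case h2 =>
    rw [hflat]
    exact pyPartitions_len _ n 1 le_rfl
  have hfun : (fun (out : List (List (List Int))) (p : List Int) =>
      if 1 < PySem.List.count p 1 then
        out ++ [buildA (PySem.List.sorted p (fun x => x) true)] else out) = pvStep := by
    funext out p
    unfold pvStep
    rw [pvBuild_eq]
  rw [hfun]
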